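-- pv_equiv track=rewrite | github.com/sharathb5/free-agents | app/tool_ingestion/models.py | normalize_tool_name
-- ===== SOURCE A (Python) =====
-- from typing import Any, Dict, List, Optional
--
-- def normalize_tool_name(name: str) -> str:
--     """
--     Deterministic normalization used for dedupe/debug/UI.
--
--     - lower-case
--     - collapse non-alnum into '_'
--     - strip leading/trailing '_'
--     """
--     s = (name or "").strip().lower()
--     out: List[str] = []
--     prev_us = False
--     for ch in s:
--         if ch.isalnum():
--             out.append(ch)
--             prev_us = False
--         else:
--             if not prev_us:
--                 out.append("_")
--                 prev_us = True
--     normalized = "".join(out).strip("_")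
--     return normalized or "tool"
-- ===== SOURCE B (Python) =====
-- def normalize_tool_name(name: str) -> str:
--     s = (name or "").strip().lower()
--     words = "".join(ch if ch.isalnum() else " " for ch in s).split()
--     return "_".join(words) or "tool"
-- ===== Notes on version B (the rewrite author's own statement) =====
-- stated objective: idiomatic
-- what changed: Replaced A's single character loop carrying a prev_us flag by three staged passes: map every non-alnum char to a space, then str.split (which collapses runs and strips the ends for free), then join the words with underscores.
import Mathlib
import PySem

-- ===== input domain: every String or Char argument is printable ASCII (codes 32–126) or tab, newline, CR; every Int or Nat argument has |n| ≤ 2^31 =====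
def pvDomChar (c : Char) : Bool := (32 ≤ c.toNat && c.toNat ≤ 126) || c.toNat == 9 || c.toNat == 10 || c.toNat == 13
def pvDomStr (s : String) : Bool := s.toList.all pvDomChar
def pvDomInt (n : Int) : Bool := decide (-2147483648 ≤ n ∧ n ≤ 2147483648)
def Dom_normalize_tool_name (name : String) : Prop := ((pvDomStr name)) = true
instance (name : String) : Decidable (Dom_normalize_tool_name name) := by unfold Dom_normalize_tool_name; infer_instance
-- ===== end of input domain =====

-- B replaces A's single-pass loop with a prev_us flag by three staged passes:
-- map every non-alnum char to a space, str.split() (which collapses and strips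
-- whitespace), and '_'.join (idiomatic; same cost).

-- ===== PORT A =====
-- the loop body of A: state (out, prev_us)
def pvStepA (st : List Char × Bool) (ch : Char) : List Char × Bool :=
  if PySem.Chars.isalnum ch then (st.1 ++ [ch], false)
  else if !st.2 then (st.1 ++ ['_'], true) else st

def normalize_tool_name (name : String) : String :=
  -- (name or "") = name here: if name is falsy it IS ""
  let s := PySem.Chars.lower (PySem.Chars.strip name.toList)
  let r := s.foldl pvStepA ([], false)
  let normalized := PySem.Chars.stripChars r.1 ['_']
  if normalized.isEmpty then "tool" else String.mk normalized

-- ===== PORT B =====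
def normalize_tool_name_alt (name : String) : String :=
  let s := PySem.Chars.lower (PySem.Chars.strip name.toList)
  let words := PySem.Chars.split₀ (s.map (fun ch => if PySem.Chars.isalnum ch then ch else ' '))
  let normalized := PySem.Chars.join ['_'] words
  if normalized.isEmpty then "tool" else String.mk normalized

-- ===== PRECONDITION & SPEC =====
def Spec_normalize_tool_name (name : String) (out : String) : Prop := out = normalize_tool_name_alt name
instance (name : String) (out : String) : Decidable (Spec_normalize_tool_name name out) := by unfold Spec_normalize_tool_name; infer_instance

-- ===== CLAIM (what is proved, stated in full; the proofs are below) =====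
def Claim_equal_normalize_tool_name : Prop := ∀ (name : String), Dom_normalize_tool_name name → Spec_normalize_tool_name name (normalize_tool_name name)

-- ===== LEMMAS AND PROOFS =====

-- the maximal alnum runs ("words") of a char list, in order
def pvWords : List Char → List (List Char)
  | [] => []
  | c :: cs =>
    if PySem.Chars.isalnum c then
      (c :: cs.takeWhile PySem.Chars.isalnum) :: pvWords (cs.dropWhile PySem.Chars.isalnum)
    else pvWords cs
  termination_by cs => cs.length
  decreasing_by
    · exact Nat.lt_succ_of_le (List.length_dropWhile_le _ _)
    · exact Nat.lt_succ_of_le (Nat.le_refl _)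

-- the pieces A's loop appends: each alnum run verbatim, one '_' per non-alnum run
def pvPieces : List Char → List (List Char)
  | [] => []
  | c :: cs =>
    if PySem.Chars.isalnum c then
      (c :: cs.takeWhile PySem.Chars.isalnum) :: pvPieces (cs.dropWhile PySem.Chars.isalnum)
    else
      ['_'] :: pvPieces (cs.dropWhile (fun d => !PySem.Chars.isalnum d))
  termination_by cs => cs.length
  decreasing_by
    · exact Nat.lt_succ_of_le (List.length_dropWhile_le _ _)
    · exact Nat.lt_succ_of_le (List.length_dropWhile_le _ _)

-- '_'-join, in the recursion shape the proofs use
def pvJoinUS : List (List Char) → List Char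
  | [] => []
  | [w] => w
  | w :: ws => w ++ '_' :: pvJoinUS ws

lemma pv_alnum_not_space (c : Char) (h : PySem.Chars.isalnum c = true) :
    PySem.Chars.isspace c = false := by
  have e1 : 'A'.val.toNat = 65 := rfl
  have e2 : 'Z'.val.toNat = 90 := rfl
  have e3 : 'a'.val.toNat = 97 := rfl
  have e4 : 'z'.val.toNat = 122 := rfl
  have e5 : '0'.val.toNat = 48 := rfl
  have e6 : '9'.val.toNat = 57 := rfl
  simp only [PySem.Chars.isalnum, PySem.Chars.isalpha, PySem.Chars.isdigit,
    PySem.Chars.isupper, PySem.Chars.islower, Char.le_def, UInt32.le_iff_toNat_le,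
    e1, e2, e3, e4, e5, e6, Bool.or_eq_true, Bool.and_eq_true, decide_eq_true_eq] at h
  simp only [PySem.Chars.isspace, Char.toNat, Bool.or_eq_false_iff, Bool.and_eq_false_iff,
    decide_eq_false_iff_not]
  omega

lemma pv_space_mapped (c : Char) :
    PySem.Chars.isspace (if PySem.Chars.isalnum c then c else ' ') = !PySem.Chars.isalnum c := by
  by_cases h : PySem.Chars.isalnum c = true
  · simp [h, pv_alnum_not_space c h]
  · simp at h
    simp [h]
    decide

lemma pv_head_dropWhile {p : Char → Bool} {l : List Char} {x : Char} {xs : List Char}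
    (h : l.dropWhile p = x :: xs) : p x = false := by
  induction l with
  | nil => simp at h
  | cons a as ih =>
    rw [List.dropWhile_cons] at h
    split at h
    · exact ih h
    · next hp => cases h; simpa using hp

lemma pvWords_dropWhile (t : List Char) :
    pvWords (t.dropWhile (fun d => !PySem.Chars.isalnum d)) = pvWords t := by
  induction t with
  | nil => rfl
  | cons c cs ih =>
    by_cases hc : PySem.Chars.isalnum c = true
    · simp [List.dropWhile_cons, hc]
    · simp at hc
      simp [List.dropWhile_cons, hc, ih, pvWords]

lemma pv_intercalate_eq_joinUS (ws : List (List Char)) :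
    List.intercalate ['_'] ws = pvJoinUS ws := by
  induction ws with
  | nil => rfl
  | cons w ws ih =>
    cases ws with
    | nil => simp [pvJoinUS, List.intercalate, List.intersperse]
    | cons v vs =>
      simp only [pvJoinUS, ← ih]
      simp [List.intercalate, List.intersperse]

-- split₀.go on the mapped string accumulates exactly the alnum runs
lemma pv_go_mapped (n : Nat) : ∀ (s : List Char), s.length ≤ n →
    ∀ (cur : List Char) (accs : List (List Char)),
    PySem.Chars.split₀.go (s.map (fun ch => if PySem.Chars.isalnum ch then ch else ' ')) cur accs =
      accs.reverse ++ (if cur.isEmpty then pvWords s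
        else (cur.reverse ++ s.takeWhile PySem.Chars.isalnum) :: pvWords (s.dropWhile PySem.Chars.isalnum)) := by
  induction n with
  | zero =>
    intro s h cur accs
    have : s = [] := List.eq_nil_of_length_eq_zero (Nat.le_zero.mp h)
    subst this
    cases cur <;> simp [PySem.Chars.split₀.go, pvWords]
  | succ n ih =>
    intro s h cur accs
    cases s with
    | nil => cases cur <;> simp [PySem.Chars.split₀.go, pvWords]
    | cons c cs =>
      have hlen : cs.length ≤ n := Nat.le_of_succ_le_succ h
      by_cases hc : PySem.Chars.isalnum c = true
      · have hsp : PySem.Chars.isspace (if PySem.Chars.isalnum c then c else ' ') = false := by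
          rw [pv_space_mapped, hc]; rfl
        simp only [List.map_cons, PySem.Chars.split₀.go, hsp, Bool.false_eq_true, ite_false]
        rw [if_pos hc, ih cs hlen (c :: cur) accs]
        simp [pvWords, hc, List.dropWhile_cons]
      · have hc' : PySem.Chars.isalnum c = false := by simpa using hc
        have hsp : PySem.Chars.isspace (if PySem.Chars.isalnum c then c else ' ') = true := by
          rw [pv_space_mapped, hc']; rfl
        cases cur with
        | nil =>
          simp only [List.map_cons, PySem.Chars.split₀.go, hsp, if_pos, List.isEmpty_nil]
          rw [ih cs hlen [] accs]
          simp [pvWords, hc']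
        | cons u us =>
          simp only [List.map_cons, PySem.Chars.split₀.go, hsp, if_pos, List.isEmpty_cons,
            Bool.false_eq_true, ite_false]
          rw [ih cs hlen [] ((u :: us).reverse :: accs)]
          simp [pvWords, hc']

lemma pv_split_mapped (s : List Char) :
    PySem.Chars.split₀ (s.map (fun ch => if PySem.Chars.isalnum ch then ch else ' ')) = pvWords s := by
  have := pv_go_mapped s.length s le_rfl [] []
  simpa [PySem.Chars.split₀] using this

-- an alnum-prefixed piece list flattens through takeWhile/dropWhile
lemma pvPieces_take_drop (n : Nat) : ∀ (cs : List Char), cs.length ≤ n →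
    (pvPieces cs).flatten =
      cs.takeWhile PySem.Chars.isalnum ++ (pvPieces (cs.dropWhile PySem.Chars.isalnum)).flatten := by
  induction n with
  | zero =>
    intro cs h
    have : cs = [] := List.eq_nil_of_length_eq_zero (Nat.le_zero.mp h)
    subst this; simp [pvPieces]
  | succ n ih =>
    intro cs h
    cases cs with
    | nil => simp [pvPieces]
    | cons c cs =>
      by_cases hc : PySem.Chars.isalnum c = true
      · simp only [pvPieces, hc, if_pos, List.takeWhile_cons, List.dropWhile_cons]
        simp [hc]
      · simp [List.takeWhile_cons, List.dropWhile_cons, hc]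

-- A's fold equals the flattened pieces, generalized over the accumulator and the flag
lemma pvFold_eq (n : Nat) : ∀ (cs : List Char), cs.length ≤ n → ∀ (acc : List Char) (p : Bool),
    (cs.foldl pvStepA (acc, p)).1 =
      acc ++ (pvPieces (if p then cs.dropWhile (fun d => !PySem.Chars.isalnum d) else cs)).flatten := by
  induction n with
  | zero =>
    intro cs h acc p
    have : cs = [] := List.eq_nil_of_length_eq_zero (Nat.le_zero.mp h)
    subst this; cases p <;> simp [pvPieces]
  | succ n ih =>
    intro cs h acc p
    cases cs with
    | nil => cases p <;> simp [pvPieces]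
    | cons c cs =>
      have hlen : cs.length ≤ n := Nat.le_of_succ_le_succ h
      by_cases hc : PySem.Chars.isalnum c = true
      · have step : pvStepA (acc, p) c = (acc ++ [c], false) := by simp [pvStepA, hc]
        have := ih cs hlen (acc ++ [c]) false
        have htd := pvPieces_take_drop n cs hlen
        cases p <;>
          simp_all [List.foldl_cons, pvPieces, hc, List.dropWhile_cons,
            List.takeWhile_cons]
      · cases p with
        | false =>
          have step : pvStepA (acc, false) c = (acc ++ ['_'], true) := by simp [pvStepA, hc]
          have := ih cs hlen (acc ++ ['_']) true
          simp_all [List.foldl_cons, pvPieces, hc]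
        | true =>
          have step : pvStepA (acc, true) c = (acc, true) := by simp [pvStepA, hc]
          have := ih cs hlen acc true
          simp_all [List.foldl_cons]

-- strip from the right, as stripChars does
def pvRstripUS (x : List Char) : List Char :=
  (x.reverse.dropWhile (fun c => (['_'] : List Char).contains c)).reverse

lemma pvRstripUS_append (x y : List Char) (h : pvRstripUS y ≠ []) :
    pvRstripUS (x ++ y) = x ++ pvRstripUS y := by
  unfold pvRstripUS at *
  have h2 : (y.reverse.dropWhile (fun c => (['_'] : List Char).contains c)).isEmpty = false := by
    rcases he : List.dropWhile (fun c => (['_'] : List Char).contains c) y.reverse with _ | ⟨a, b⟩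
    · exact absurd (by rw [he]; rfl) h
    · rfl
  rw [List.reverse_append, List.dropWhile_append, h2]
  simp

lemma pvRstripUS_all_alnum (w : List Char) (h : ∀ c ∈ w, PySem.Chars.isalnum c = true) :
    pvRstripUS w = w := by
  unfold pvRstripUS
  rcases hw : w.reverse with _ | ⟨a, b⟩
  · have : w = [] := by simpa using congrArg List.reverse hw
    subst this; rfl
  · have ha : a ∈ w := by
      have : a ∈ w.reverse := by rw [hw]; exact List.mem_cons_self
      simpa using this
    have hal : PySem.Chars.isalnum a = true := h a ha
    have hne : a ≠ '_' := by intro he; subst he; revert hal; decide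
    rw [List.dropWhile_cons, if_neg (by simp [hne])]
    rw [← hw, List.reverse_reverse]

lemma pvRstripUS_append_us (x : List Char) :
    pvRstripUS (x ++ ['_']) = pvRstripUS x := by
  unfold pvRstripUS
  rw [List.reverse_append]
  rfl

-- a word list produced from an alnum run is fully alnum
lemma pv_word_all_alnum (c : Char) (cs : List Char) (hc : PySem.Chars.isalnum c = true) :
    ∀ x ∈ c :: cs.takeWhile PySem.Chars.isalnum, PySem.Chars.isalnum x = true := by
  intro x hx
  rcases List.mem_cons.mp hx with h | h
  · subst h; exact hc
  · exact List.mem_takeWhile_imp h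

lemma pvJoinUS_word_ne_nil (c : Char) (t : List Char) (ws : List (List Char)) :
    pvJoinUS ((c :: t) :: ws) ≠ [] := by
  cases ws <;> simp [pvJoinUS]

-- right-strip of the flattened pieces of an alnum-headed (or empty) list = '_'-join of its words
lemma pvRstrip_flatten (n : Nat) : ∀ (s : List Char), s.length ≤ n →
    (s = [] ∨ ∃ c cs, s = c :: cs ∧ PySem.Chars.isalnum c = true) →
    pvRstripUS (pvPieces s).flatten = pvJoinUS (pvWords s) := by
  induction n with
  | zero =>
    intro s h _
    have : s = [] := List.eq_nil_of_length_eq_zero (Nat.le_zero.mp h)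
    subst this; simp [pvPieces, pvWords, pvRstripUS, pvJoinUS]
  | succ n ih =>
    intro s h hs
    rcases hs with rfl | ⟨c, cs, rfl, hc⟩
    · simp [pvPieces, pvWords, pvRstripUS, pvJoinUS]
    · have hlen : cs.length ≤ n := Nat.le_of_succ_le_succ h
      have hwall := pv_word_all_alnum c cs hc
      simp only [pvPieces, pvWords, hc, if_pos, List.flatten_cons]
      rcases hd : cs.dropWhile PySem.Chars.isalnum with _ | ⟨x, xs⟩
      · -- no further input: single word
        simp only [pvPieces, List.flatten_nil, List.append_nil, pvWords, pvJoinUS]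
        exact pvRstripUS_all_alnum _ hwall
      · have hx : PySem.Chars.isalnum x = false := pv_head_dropWhile hd
        simp only [pvPieces, pvWords, hx, Bool.false_eq_true, if_neg, ite_false, List.flatten_cons]
        rcases he : xs.dropWhile (fun d => !PySem.Chars.isalnum d) with _ | ⟨y, ys⟩
        · -- trailing non-alnum run only: word ++ '_'
          have hwe : pvWords xs = [] := by rw [← pvWords_dropWhile xs, he]; simp [pvWords]
          simp only [pvPieces, List.flatten_nil, List.append_nil, hwe, pvJoinUS]
          rw [pvRstripUS_append_us]
          exact pvRstripUS_all_alnum _ hwall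
        · have hy : PySem.Chars.isalnum y = true := by
            have := pv_head_dropWhile he
            simpa using this
          have helen : (y :: ys).length ≤ n := by
            have h1 : (xs.dropWhile (fun d => !PySem.Chars.isalnum d)).length ≤ xs.length :=
              List.length_dropWhile_le _ _
            have h2 : (cs.dropWhile PySem.Chars.isalnum).length ≤ cs.length :=
              List.length_dropWhile_le _ _
            rw [he] at h1
            rw [hd] at h2
            simp only [List.length_cons] at h1 h2 ⊢
            omega
          have ihe := ih (y :: ys) helen (Or.inr ⟨y, ys, rfl, hy⟩)
          have hwe : pvWords (y :: ys) = pvWords xs := by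
            rw [← he]; exact pvWords_dropWhile xs
          have hne : pvRstripUS (pvPieces (y :: ys)).flatten ≠ [] := by
            rw [ihe, pvWords]
            simp only [hy, if_pos]
            exact pvJoinUS_word_ne_nil _ _ _
          have hsplit : ((c :: List.takeWhile PySem.Chars.isalnum cs) ++
                  (['_'] ++ (pvPieces (y :: ys)).flatten)) =
                (((c :: List.takeWhile PySem.Chars.isalnum cs) ++ ['_']) ++
                  (pvPieces (y :: ys)).flatten) := by
            simp
          rw [hsplit, pvRstripUS_append _ _ hne, ihe, hwe]
          have hwene : pvWords xs ≠ [] := by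
            rw [← hwe, pvWords]
            simp only [hy, if_pos]
            intro hcon
            exact (by simp at hcon : False)
          rcases hz : pvWords xs with _ | ⟨z, zs⟩
          · exact absurd hz hwene
          · simp [pvJoinUS]

-- the full stripChars of A's flattened pieces = '_'-join of the words, for every s
lemma pvStrip_flatten (s : List Char) :
    PySem.Chars.stripChars (pvPieces s).flatten ['_'] = pvJoinUS (pvWords s) := by
  have hstrip : ∀ (x : List Char),
      PySem.Chars.stripChars x ['_'] =
        pvRstripUS (x.dropWhile (fun c => (['_'] : List Char).contains c)) := by
    intro x; rfl
  rw [hstrip]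
  cases s with
  | nil => simp [pvPieces, pvWords, pvRstripUS, pvJoinUS]
  | cons c cs =>
    by_cases hc : PySem.Chars.isalnum c = true
    · have hne : c ≠ '_' := by
        intro he; subst he; revert hc; decide
      simp only [pvPieces, hc, if_pos, List.flatten_cons, List.cons_append,
        List.dropWhile_cons]
      rw [if_neg (by simp [hne])]
      have := pvRstrip_flatten (c :: cs).length (c :: cs) le_rfl (Or.inr ⟨c, cs, rfl, hc⟩)
      simpa [pvPieces, hc, pvWords] using this
    · have hc' : PySem.Chars.isalnum c = false := by simpa using hc
      simp only [pvPieces, pvWords, hc', Bool.false_eq_true, if_neg, ite_false,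
        List.flatten_cons, List.singleton_append, List.dropWhile_cons]
      rw [if_pos (by simp)]
      rw [← pvWords_dropWhile cs]
      generalize he : cs.dropWhile (fun d => !PySem.Chars.isalnum d) = e
      have heshape : e = [] ∨ ∃ y ys, e = y :: ys ∧ PySem.Chars.isalnum y = true := by
        rcases e with _ | ⟨y, ys⟩
        · exact Or.inl rfl
        · refine Or.inr ⟨y, ys, rfl, ?_⟩
          have := pv_head_dropWhile he
          simpa using this
      have hdw : (pvPieces e).flatten.dropWhile (fun c => (['_'] : List Char).contains c) =
          (pvPieces e).flatten := by
        rcases heshape with rfl | ⟨y, ys, he2, hy⟩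
        · simp [pvPieces]
        · subst he2
          simp only [pvPieces, hy, if_pos, List.flatten_cons, List.cons_append,
            List.dropWhile_cons]
          rw [if_neg (by simp; intro hcon; subst hcon; revert hy; decide)]
      rw [hdw]
      exact pvRstrip_flatten e.length e le_rfl heshape

-- ===== VERDICT (by name: the statement is the Claim_ definition above) =====
theorem normalize_tool_name_spec : Claim_equal_normalize_tool_name := by
  intro name _
  unfold Spec_normalize_tool_name normalize_tool_name normalize_tool_name_alt
  have hA := pvFold_eq (PySem.Chars.lower (PySem.Chars.strip name.toList)).length
      (PySem.Chars.lower (PySem.Chars.strip name.toList)) le_rfl [] false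
  simp only [if_neg Bool.false_ne_true, List.nil_append] at hA
  have hB := pv_split_mapped (PySem.Chars.lower (PySem.Chars.strip name.toList))
  have hS := pvStrip_flatten (PySem.Chars.lower (PySem.Chars.strip name.toList))
  simp only [hA, hB, hS, PySem.Chars.join, pv_intercalate_eq_joinUS]
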